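-- pv_equiv track=rewrite | github.com/zwxzwxzwx21/ktane-bot- | .idea/KTANE.py | find_unique_match
-- ===== SOURCE A (Python) =====
-- def find_unique_match(string, lut):
--     possible_matches = []
--
--     # Przeszukiwanie LUT w poszukiwaniu dopasowań prefiksowych
--     for pattern, value in lut.items():
--         for i in range(len(pattern)):
--             shifted_pattern = pattern[i:] + pattern[:i]
--             # Jeśli string jest prefiksem przesuniętego wzorca, dodajemy go do dopasowań
--             if shifted_pattern.startswith(string):
--                 possible_matches.append(value)
--
--     # Sprawdzamy, czy pozostało dokładnie jedno możliwe dopasowanie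
--     if len(possible_matches) == 1:
--         return possible_matches[0]  # Zwracamy jedyne możliwe dopasowanie
--
--     return None
-- ===== SOURCE B (Python) =====
-- def find_unique_match(string, lut):
--     m = len(string)
--     total = 0
--     found = None
--     # A cyclic rotation of pattern starts with string iff string occurs in
--     # pattern + pattern[:len(string)-1] at some position < len(pattern).
--     for pattern, value in lut.items():
--         n = len(pattern)
--         if m > n:
--             continue
--         text = pattern + pattern[:max(m - 1, 0)]
--         cnt = 0
--         pos = text.find(string)
--         while 0 <= pos < n:
--             cnt += 1
--             pos = text.find(string, pos + 1)
--         if cnt: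
--             total += cnt
--             found = value
--     return found if total == 1 else None
-- ===== Notes on version B (the rewrite author's own statement) =====
-- stated objective: faster
-- what changed: Instead of materialising every cyclic rotation pattern[i:]+pattern[:i] and testing startswith, B searches for string in the doubled text pattern + pattern[:len(string)-1] with repeated str.find, counting occurrence positions below len(pattern), accumulating a running total and last matched value instead of a match list.
import Mathlib
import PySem

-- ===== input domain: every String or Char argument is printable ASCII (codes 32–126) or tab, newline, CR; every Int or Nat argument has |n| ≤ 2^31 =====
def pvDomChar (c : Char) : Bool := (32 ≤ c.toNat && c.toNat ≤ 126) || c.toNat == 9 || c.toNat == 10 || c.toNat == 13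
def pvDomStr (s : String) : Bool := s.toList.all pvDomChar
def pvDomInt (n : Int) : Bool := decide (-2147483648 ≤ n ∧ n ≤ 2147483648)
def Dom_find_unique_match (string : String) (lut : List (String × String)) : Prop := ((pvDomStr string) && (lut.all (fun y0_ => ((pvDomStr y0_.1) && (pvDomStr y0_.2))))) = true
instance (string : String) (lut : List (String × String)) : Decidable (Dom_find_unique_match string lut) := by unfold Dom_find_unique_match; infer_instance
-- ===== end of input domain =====

-- B replaces A's per-rotation slice-and-compare scan with substring search for `string`
-- in pattern + pattern[:len(string)-1] (objective: faster, constant-factor).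

-- ===== PORT A =====
def find_unique_match (string : String) (lut : List (String × String)) : Option String :=
  let s := string.toList
  let possible_matches :=
    lut.foldl (fun acc pv =>
      let p := pv.1.toList
      (PySem.List.pyRange 0 (p.length : Int)).foldl (fun acc i =>
        let shifted := PySem.List.slice p (some i) none ++ PySem.List.slice p none (some i)
        if PySem.Chars.startswith shifted s then acc ++ [pv.2] else acc) acc) []
  if possible_matches.length = 1 then PySem.List.pyGet? possible_matches 0 else none

-- ===== PORT B =====
-- the `while 0 <= pos < n:` loop of Source B; `pos` strictly increases each round and the
-- loop runs only while `pos < n`, so fuel `n` (plus the guard at fuel 0) is exact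
def find_unique_match_altLoop (text s : List Char) (n : Nat) (fuel : Nat) (pos : Int) (cnt : Int) : Int :=
  match fuel with
  | 0 => cnt
  | fuel + 1 =>
    if 0 ≤ pos ∧ pos < (n : Int) then
      find_unique_match_altLoop text s n fuel (PySem.Chars.findFrom text s (pos + 1)) (cnt + 1)
    else cnt

def find_unique_match_alt (string : String) (lut : List (String × String)) : Option String :=
  let s := string.toList
  let m := s.length
  let r :=
    lut.foldl (fun (acc : Int × Option String) pv =>
      let p := pv.1.toList
      let n : Nat := p.length
      if (m : Int) > (n : Int) then acc
      else
        let text := p ++ p.take (m - 1)   -- pattern[:max(m-1,0)]: Nat subtraction is that max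
        let cnt := find_unique_match_altLoop text s n n (PySem.Chars.find text s) 0
        if cnt ≠ 0 then (acc.1 + cnt, some pv.2) else acc) (0, none)
  if r.1 = 1 then r.2 else none

-- ===== PRECONDITION & SPEC =====
def Spec_find_unique_match (string : String) (lut : List (String × String)) (out : Option String) : Prop := out = find_unique_match_alt string lut
instance (string : String) (lut : List (String × String)) (out : Option String) : Decidable (Spec_find_unique_match string lut out) := by unfold Spec_find_unique_match; infer_instance

-- ===== CLAIM (what is proved, stated in full; the proofs are below) =====
def Claim_equal_find_unique_match : Prop := ∀ (string : String) (lut : List (String × String)), Dom_find_unique_match string lut → Spec_find_unique_match string lut (find_unique_match string lut)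

-- ===== LEMMAS AND PROOFS =====

-- rotation-vs-doubled-text: for i < |p| and |s| ≤ |p|, the i-th cyclic rotation of p
-- starts with s iff s occurs at position i of p ++ p.take (|s| - 1)
lemma rot_iff_occ (p s : List Char) (i : Nat) (hm : s.length ≤ p.length) (hi : i < p.length) :
    s <+: p.drop i ++ p.take i ↔ s <+: p.drop i ++ p.take (s.length - 1) := by
  rw [List.prefix_iff_eq_take, List.prefix_iff_eq_take, List.take_append, List.take_append]
  have hlen : (p.drop i).length = p.length - i := List.length_drop ..
  rw [List.take_take, List.take_take, hlen]
  rcases Nat.eq_zero_or_pos (s.length - (p.length - i)) with h0 | hpos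
  · rw [h0]; simp
  · have h1 : min (s.length - (p.length - i)) i = s.length - (p.length - i) := by omega
    have h2 : min (s.length - (p.length - i)) (s.length - 1) = s.length - (p.length - i) := by omega
    rw [h1, h2]

lemma no_occ_of_findFrom_neg (text s : List Char) (k : Nat) (hk : k ≤ text.length)
    (h : PySem.Chars.findFrom text s (k : Int) = -1) :
    ∀ i, k ≤ i → ¬ s <+: text.drop i := by
  intro i hki hpre
  rw [PySem.Chars.findFrom_natCast_eq_neg_one_iff text s k hk] at h
  apply h
  have : text.drop i = (text.drop k).drop (i - k) := by rw [List.drop_drop]; congr 1; omega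
  rw [this] at hpre
  exact hpre.isInfix.trans (List.drop_suffix _ _).isInfix

-- the while-loop counts the occurrence positions in [k, n)
lemma altLoop_count (text s : List Char) (n : Nat) (hn : n ≤ text.length) :
    ∀ fuel k (cnt : Int), k ≤ text.length → n - k ≤ fuel →
      find_unique_match_altLoop text s n fuel (PySem.Chars.findFrom text s (k : Int)) cnt
        = cnt + ((List.range' k (n - k)).countP (fun i => decide (s <+: text.drop i)) : Int) := by
  intro fuel
  induction fuel with
  | zero =>
    intro k cnt hk hfk
    have hz : n - k = 0 := by omega
    rw [hz]
    simp [find_unique_match_altLoop]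
  | succ fuel ih =>
    intro k cnt hk hfk
    by_cases hneg : PySem.Chars.findFrom text s (k : Int) = -1
    · have hno := no_occ_of_findFrom_neg text s k hk hneg
      have hcz : (List.range' k (n - k)).countP (fun i => decide (s <+: text.drop i)) = 0 := by
        rw [List.countP_eq_zero]
        intro i hi
        simp only [decide_eq_true_eq]
        exact hno i (List.mem_range'_1.mp hi).1
      rw [hneg, hcz]
      simp [find_unique_match_altLoop]
    · obtain ⟨hkr, hocc, hmin⟩ := PySem.Chars.findFrom_natCast_spec text s k hk hneg
      set r := PySem.Chars.findFrom text s (k : Int) with hr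
      have hr0 : (0 : Int) ≤ r := le_trans (Int.natCast_nonneg k) hkr
      have hrt : r = ((r.toNat : Nat) : Int) := (Int.toNat_of_nonneg hr0).symm
      have hkr' : k ≤ r.toNat := by omega
      by_cases hlt : r < (n : Int)
      · have hlt' : r.toNat < n := by omega
        have hstep : find_unique_match_altLoop text s n (fuel + 1) r cnt
            = find_unique_match_altLoop text s n fuel (PySem.Chars.findFrom text s (r + 1)) (cnt + 1) := by
          simp only [find_unique_match_altLoop]
          rw [if_pos ⟨hr0, hlt⟩]
        have hcast : r + 1 = ((r.toNat + 1 : Nat) : Int) := by omega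
        rw [hstep, hcast, ih (r.toNat + 1) (cnt + 1) (by omega) (by omega)]
        have e2 : (r.toNat - k) + (n - r.toNat) = n - k := by omega
        have hsplit : List.range' k (n - k)
            = List.range' k (r.toNat - k) ++ List.range' (k + (r.toNat - k)) (n - r.toNat) := by
          rw [List.range'_append_1, e2]
        have e1 : k + (r.toNat - k) = r.toNat := by omega
        have e3 : n - r.toNat = (n - (r.toNat + 1)) + 1 := by omega
        rw [hsplit, e1, e3, List.range'_succ, List.countP_append, List.countP_cons]
        have hc1 : (List.range' k (r.toNat - k)).countP (fun i => decide (s <+: text.drop i)) = 0 := by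
          rw [List.countP_eq_zero]
          intro i hi
          have hm := List.mem_range'_1.mp hi
          simp only [decide_eq_true_eq]
          exact hmin i hm.1 (by omega)
        rw [hc1]
        simp only [decide_eq_true_eq, hocc, if_pos]
        push_cast
        ring
      · have hstop : find_unique_match_altLoop text s n (fuel + 1) r cnt = cnt := by
          simp only [find_unique_match_altLoop]
          rw [if_neg (by omega)]
        have hcz : (List.range' k (n - k)).countP (fun i => decide (s <+: text.drop i)) = 0 := by
          rw [List.countP_eq_zero]
          intro i hi
          have hm := List.mem_range'_1.mp hi
          simp only [decide_eq_true_eq]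
          exact hmin i hm.1 (by omega)
        rw [hstop, hcz]
        simp

-- per-pattern count equality: A's rotation count = B's loop count (m ≤ n branch)
lemma count_eq (p s : List Char) (hm : s.length ≤ p.length) :
    find_unique_match_altLoop (p ++ p.take (s.length - 1)) s p.length p.length
        (PySem.Chars.find (p ++ p.take (s.length - 1)) s) 0
      = ((List.range p.length).countP (fun i => decide (s <+: p.drop i ++ p.take i)) : Int) := by
  have htl : p.length ≤ (p ++ p.take (s.length - 1)).length := by
    rw [List.length_append]; omega
  have h0 : PySem.Chars.find (p ++ p.take (s.length - 1)) s
      = PySem.Chars.findFrom (p ++ p.take (s.length - 1)) s ((0 : Nat) : Int) := by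
    rw [Nat.cast_zero, PySem.Chars.findFrom_zero]
  rw [h0, altLoop_count (p ++ p.take (s.length - 1)) s p.length htl p.length 0 0 (by omega) (by omega)]
  rw [Nat.sub_zero, ← List.range_eq_range', zero_add]
  congr 1
  exact_mod_cast congrArg Nat.cast (List.countP_congr (fun i hi => by
    have hi' : i ≤ p.length := le_of_lt (List.mem_range.mp hi)
    rw [List.drop_append_of_le_length hi']
    simp only [decide_eq_true_eq]
    exact (rot_iff_occ p s i hm (List.mem_range.mp hi)).symm))

-- the inner A loop appends exactly that many copies of the value
lemma innerA_eq (p s : List Char) (v : String) (acc : List String) :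
    (PySem.List.pyRange 0 (p.length : Int)).foldl (fun acc i =>
        if PySem.Chars.startswith (PySem.List.slice p (some i) none ++ PySem.List.slice p none (some i)) s
        then acc ++ [v] else acc) acc
      = acc ++ List.replicate ((List.range p.length).countP (fun i => decide (s <+: p.drop i ++ p.take i))) v := by
  rw [PySem.List.pyRange_zero_natCast, List.foldl_map]
  rw [PySem.List.foldl_append_if
    (fun (i : Nat) => PySem.Chars.startswith
      (PySem.List.slice p (some ((i : Nat) : Int)) none ++ PySem.List.slice p none (some ((i : Nat) : Int))) s)
    (fun _ => v)]
  rw [List.map_const', ← List.countP_eq_length_filter]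
  congr 2
  refine List.countP_congr (fun i hi => ?_)
  rw [PySem.List.slice_from_natCast, PySem.List.slice_to_natCast]
  rw [PySem.Chars.startswith_iff]
  simp

lemma countA_zero (p s : List Char) (hm : p.length < s.length) :
    (List.range p.length).countP (fun i => decide (s <+: p.drop i ++ p.take i)) = 0 := by
  rw [List.countP_eq_zero]
  intro i hi
  simp only [decide_eq_true_eq]
  intro hpre
  have := hpre.length_le
  rw [List.length_append, List.length_drop, List.length_take] at this
  have := List.mem_range.mp hi
  omega

lemma getLast?_eq_pyGet?_zero (l : List String) (h : l.length = 1) :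
    PySem.List.pyGet? l 0 = l.getLast? := by
  match l, h with
  | [x], _ => rfl

theorem find_unique_match_spec_aux (s : List Char) (lut : List (String × String))
    (acc : List String) (t : Int) (f : Option String)
    (ht : t = (acc.length : Int)) (hf : f = acc.getLast?) :
    (lut.foldl (fun (st : Int × Option String) pv =>
        let p := pv.1.toList
        let n : Nat := p.length
        if (s.length : Int) > (n : Int) then st
        else
          let text := p ++ p.take (s.length - 1)
          let cnt := find_unique_match_altLoop text s n n (PySem.Chars.find text s) 0
          if cnt ≠ 0 then (st.1 + cnt, some pv.2) else st) (t, f)).1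
      = ((lut.foldl (fun acc pv =>
          let p := pv.1.toList
          (PySem.List.pyRange 0 (p.length : Int)).foldl (fun acc i =>
            let shifted := PySem.List.slice p (some i) none ++ PySem.List.slice p none (some i)
            if PySem.Chars.startswith shifted s then acc ++ [pv.2] else acc) acc) acc).length : Int)
    ∧ (lut.foldl (fun (st : Int × Option String) pv =>
        let p := pv.1.toList
        let n : Nat := p.length
        if (s.length : Int) > (n : Int) then st
        else
          let text := p ++ p.take (s.length - 1)
          let cnt := find_unique_match_altLoop text s n n (PySem.Chars.find text s) 0
          if cnt ≠ 0 then (st.1 + cnt, some pv.2) else st) (t, f)).2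
      = (lut.foldl (fun acc pv =>
          let p := pv.1.toList
          (PySem.List.pyRange 0 (p.length : Int)).foldl (fun acc i =>
            let shifted := PySem.List.slice p (some i) none ++ PySem.List.slice p none (some i)
            if PySem.Chars.startswith shifted s then acc ++ [pv.2] else acc) acc) acc).getLast? := by
  induction lut generalizing acc t f with
  | nil =>
    subst ht hf
    exact ⟨rfl, rfl⟩
  | cons pv rest ih =>
    simp only [List.foldl_cons]
    rw [innerA_eq pv.1.toList s pv.2 acc]
    by_cases hmn : (s.length : Int) > ((pv.1.toList).length : Int)
    · rw [if_pos hmn, countA_zero pv.1.toList s (by exact_mod_cast hmn)]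
      simp only [List.replicate_zero, List.append_nil]
      exact ih acc t f ht hf
    · have hm : s.length ≤ (pv.1.toList).length := by omega
      rw [if_neg hmn, count_eq pv.1.toList s hm]
      by_cases hc : (List.range (pv.1.toList).length).countP
          (fun i => decide (s <+: (pv.1.toList).drop i ++ (pv.1.toList).take i)) = 0
      · rw [hc]
        simp only [List.replicate_zero, List.append_nil, Nat.cast_zero, ne_eq,
          not_true_eq_false, if_false]
        exact ih acc t f ht hf
      · rw [if_pos (by exact_mod_cast hc)]
        refine ih (acc ++ List.replicate _ pv.2) _ _ ?_ ?_
        · rw [List.length_append, List.length_replicate]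
          push_cast
          omega
        · rw [List.getLast?_append_of_ne_nil acc
            (by rw [ne_eq, List.replicate_eq_nil_iff]; exact hc)]
          rw [List.getLast?_replicate, if_neg hc]

-- ===== VERDICT (by name: the statement is the Claim_ definition above) =====
theorem find_unique_match_spec : Claim_equal_find_unique_match := by
  intro string lut _hdom
  unfold Spec_find_unique_match find_unique_match find_unique_match_alt
  dsimp only
  have haux := find_unique_match_spec_aux string.toList lut [] 0 none (by simp) rfl
  dsimp only at haux
  obtain ⟨h1, h2⟩ := haux
  rw [h1, h2]
  by_cases hM : (lut.foldl (fun acc pv =>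
      (PySem.List.pyRange 0 ((pv.1.toList).length : Int)).foldl (fun acc i =>
        if PySem.Chars.startswith
            (PySem.List.slice pv.1.toList (some i) none ++ PySem.List.slice pv.1.toList none (some i))
            string.toList
        then acc ++ [pv.2] else acc) acc) []).length = 1
  · rw [if_pos hM, if_pos (by exact_mod_cast hM)]
    exact getLast?_eq_pyGet?_zero _ hM
  · rw [if_neg hM, if_neg (by intro h; exact hM (by exact_mod_cast h))]
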